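-- pv_equiv track=rewrite | github.com/KeKoParis/AOIS_3 | quine.py | is_similar
-- ===== SOURCE A (Python) =====
-- def is_similar(first_expr, second_expr):
--     same = 0
--     similar = 0
--     for i in first_expr:
--         for j in second_expr:
--             if i[-1] == j[-1]:
--                 same += 1
--             if i == j:
--                 similar += 1
--
--     if same == 2 and similar == 1:
--         return True
--     return False
-- ===== SOURCE B (Python) =====
-- def is_similar(first_expr, second_expr):
--     last_counts = {}
--     for k in [j[-1:] for j in second_expr]:
--         last_counts[k] = last_counts.get(k, 0) + 1
--     full_counts = {}
--     for j in second_expr: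
--         full_counts[j] = full_counts.get(j, 0) + 1
--     same = 0
--     similar = 0
--     for i in first_expr:
--         same += last_counts.get(i[-1:], 0)
--         similar += full_counts.get(i, 0)
--     return same == 2 and similar == 1
-- ===== Notes on version B (the rewrite author's own statement) =====
-- stated objective: faster
-- what changed: Replaces A's nested loop over all (i,j) pairs with two frequency dictionaries built over second_expr in one pass, then one pass over first_expr summing lookups of each element's last character and of the element itself.
import Mathlib
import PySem

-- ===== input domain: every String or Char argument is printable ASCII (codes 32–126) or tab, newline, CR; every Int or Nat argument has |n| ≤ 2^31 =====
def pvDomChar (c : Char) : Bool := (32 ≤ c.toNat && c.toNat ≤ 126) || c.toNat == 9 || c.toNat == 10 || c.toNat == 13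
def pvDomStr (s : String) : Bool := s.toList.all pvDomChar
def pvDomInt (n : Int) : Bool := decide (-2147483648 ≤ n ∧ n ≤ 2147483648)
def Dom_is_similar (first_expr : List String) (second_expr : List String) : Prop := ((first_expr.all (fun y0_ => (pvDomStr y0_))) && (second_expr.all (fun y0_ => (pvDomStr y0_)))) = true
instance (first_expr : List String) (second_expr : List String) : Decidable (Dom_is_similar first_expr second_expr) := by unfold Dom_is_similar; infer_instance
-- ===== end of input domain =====

-- B replaces A's O(n*m) nested scan by two frequency dictionaries built over second_expr
-- in one pass, then a single pass over first_expr summing lookups (asymptotically faster).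

-- ===== PORT A =====
-- literal port of A's nested loops; i[-1] is PySem.Str.pyGet? i (-1) (none = IndexError,
-- reachable only outside Pre_, where nothing is claimed)
def is_similar (first_expr : List String) (second_expr : List String) : Bool :=
  let p : Int × Int := first_expr.foldl (fun (acc : Int × Int) i =>
    second_expr.foldl (fun (acc : Int × Int) j =>
      let acc1 := if PySem.Str.pyGet? i (-1) = PySem.Str.pyGet? j (-1) then (acc.1 + 1, acc.2) else acc
      if i = j then (acc1.1, acc1.2 + 1) else acc1) acc) (0, 0)
  if p.1 = 2 ∧ p.2 = 1 then true else false

-- ===== PORT B =====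
-- j[-1:] (a slice, never raises)
def lastSlice (s : String) : String := PySem.Str.slice s (some (-1)) none

def is_similar_alt (first_expr : List String) (second_expr : List String) : Bool :=
  let last_counts : PySem.Dict String Int :=
    (second_expr.map (fun j => lastSlice j)).foldl
      (fun d k => d.insert k (d.getD k 0 + 1)) PySem.Dict.empty
  let full_counts : PySem.Dict String Int :=
    second_expr.foldl (fun d j => d.insert j (d.getD j 0 + 1)) PySem.Dict.empty
  let same : Int := first_expr.foldl (fun s i => s + last_counts.getD (lastSlice i) 0) 0
  let similar : Int := first_expr.foldl (fun s i => s + full_counts.getD i 0) 0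
  decide (same = 2) && decide (similar = 1)

-- ===== PRECONDITION & SPEC =====
-- Pre_ excludes exactly the inputs on which A raises IndexError (i[-1] / j[-1] on an empty
-- string, reached iff both lists are nonempty and either contains ""); A returns on all of Pre_.
def Pre_is_similar (first_expr : List String) (second_expr : List String) : Prop :=
  first_expr = [] ∨ second_expr = [] ∨
    ((∀ s ∈ first_expr, s ≠ "") ∧ (∀ s ∈ second_expr, s ≠ ""))
instance (first_expr : List String) (second_expr : List String) : Decidable (Pre_is_similar first_expr second_expr) := by unfold Pre_is_similar; infer_instance

def pvWitness_is_similar : List String × List String := (["ab", "cb"], ["ab", "db"])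

def Spec_is_similar (first_expr : List String) (second_expr : List String) (out : Bool) : Prop := out = is_similar_alt first_expr second_expr
instance (first_expr : List String) (second_expr : List String) (out : Bool) : Decidable (Spec_is_similar first_expr second_expr out) := by unfold Spec_is_similar; infer_instance

-- ===== CLAIM (what is proved, stated in full; the proofs are below) =====
def Claim_equal_is_similar : Prop := ∀ (first_expr : List String) (second_expr : List String), Dom_is_similar first_expr second_expr → Pre_is_similar first_expr second_expr → Spec_is_similar first_expr second_expr (is_similar first_expr second_expr)

-- ===== LEMMAS AND PROOFS =====

-- a nonempty list dropped to its last element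
theorem drop_length_sub_one_eq {α : Type} (xs : List α) (h : xs ≠ []) :
    ∃ a, xs.drop (xs.length - 1) = [a] ∧ xs.getLast? = some a := by
  rcases List.eq_nil_or_concat xs with rfl | ⟨ys, y, rfl⟩
  · exact absurd rfl h
  · simp only [List.concat_eq_append]
    refine ⟨y, ?_, List.getLast?_concat⟩
    have hl : (ys ++ [y]).length - 1 = ys.length := by simp
    rw [hl, List.drop_left]

theorem lastSlice_toList (s : String) :
    (lastSlice s).toList = s.toList.drop (s.toList.length - 1) := by
  simp [lastSlice, PySem.Str.slice, PySem.List.slice_from_neg_one]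

-- for nonempty strings, equality of the one-char slices agrees with equality of pyGet? at -1
theorem lastSlice_eq_iff (i j : String) (hi : i ≠ "") (hj : j ≠ "") :
    (lastSlice i = lastSlice j) ↔
      (PySem.Str.pyGet? i (-1) = PySem.Str.pyGet? j (-1)) := by
  have hi' : i.toList ≠ [] := fun h => hi (String.toList_inj.mp (by simp [h]))
  have hj' : j.toList ≠ [] := fun h => hj (String.toList_inj.mp (by simp [h]))
  obtain ⟨a, ha, ha'⟩ := drop_length_sub_one_eq i.toList hi'
  obtain ⟨b, hb, hb'⟩ := drop_length_sub_one_eq j.toList hj'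
  have hg : ∀ s : String, PySem.Str.pyGet? s (-1) = s.toList.getLast? := by
    intro s; simp [PySem.Str.pyGet?, PySem.List.pyGet?_neg_one]
  constructor
  · intro h
    have := congrArg String.toList h
    rw [lastSlice_toList, lastSlice_toList, ha, hb] at this
    simp only [List.cons.injEq] at this
    rw [hg, hg, ha', hb', this.1]
  · intro h
    rw [hg, hg, ha', hb'] at h
    have hab : a = b := by injection h
    apply String.toList_inj.mp
    rw [lastSlice_toList, lastSlice_toList, ha, hb, hab]

-- A's inner loop counts matches of the two predicates over second_expr
theorem inner_fold_eq (i : String) (second : List String) :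
    ∀ acc : Int × Int,
      second.foldl (fun (acc : Int × Int) j =>
        let acc1 := if PySem.Str.pyGet? i (-1) = PySem.Str.pyGet? j (-1) then (acc.1 + 1, acc.2) else acc
        if i = j then (acc1.1, acc1.2 + 1) else acc1) acc
      = (acc.1 + (second.countP (fun j => decide (PySem.Str.pyGet? i (-1) = PySem.Str.pyGet? j (-1))) : Int),
         acc.2 + (second.countP (fun j => decide (i = j)) : Int)) := by
  induction second with
  | nil => intro acc; simp
  | cons j rest ih =>
    intro acc
    rw [List.foldl_cons, ih, List.countP_cons, List.countP_cons]
    by_cases h1 : PySem.Str.pyGet? i (-1) = PySem.Str.pyGet? j (-1) <;>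
      by_cases h2 : i = j <;>
      simp only [h1, h2, if_true, if_false] <;> simp [Prod.ext_iff] <;> omega

-- A's outer loop sums the per-i counts
theorem outer_fold_eq (first second : List String) :
    ∀ acc : Int × Int,
      first.foldl (fun (acc : Int × Int) i =>
        second.foldl (fun (acc : Int × Int) j =>
          let acc1 := if PySem.Str.pyGet? i (-1) = PySem.Str.pyGet? j (-1) then (acc.1 + 1, acc.2) else acc
          if i = j then (acc1.1, acc1.2 + 1) else acc1) acc) acc
      = (acc.1 + ((first.map (fun i => (second.countP (fun j => decide (PySem.Str.pyGet? i (-1) = PySem.Str.pyGet? j (-1))) : Int))).sum),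
         acc.2 + ((first.map (fun i => (second.countP (fun j => decide (i = j)) : Int))).sum)) := by
  induction first with
  | nil => intro acc; simp
  | cons i rest ih =>
    intro acc
    rw [List.foldl_cons, inner_fold_eq, ih]
    simp [Prod.ext_iff]
    constructor <;> ring

-- under Pre_, the per-i "same" counts of A and B agree for every i ∈ first_expr
theorem same_count_eq (first second : List String)
    (hpre : Pre_is_similar first second) (i : String) (hi : i ∈ first) :
    (second.countP (fun j => decide (PySem.Str.pyGet? i (-1) = PySem.Str.pyGet? j (-1))) : Int)
      = ((second.map (fun j => lastSlice j)).count (lastSlice i) : Int) := by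
  rw [List.count_eq_countP, List.countP_map]
  congr 1
  apply List.countP_congr
  intro j hj
  rcases hpre with h | h | ⟨h1, h2⟩
  · exact absurd hi (h ▸ List.not_mem_nil)
  · exact absurd hj (h ▸ List.not_mem_nil)
  · have := lastSlice_eq_iff i j (h1 i hi) (h2 j hj)
    simp only [Function.comp]
    constructor
    · intro hp; simp only [decide_eq_true_eq] at hp
      simp only [beq_iff_eq]; exact (this.mpr hp).symm
    · intro hp; simp only [beq_iff_eq] at hp
      simp only [decide_eq_true_eq]; exact this.mp hp.symm

theorem similar_count_eq (second : List String) (i : String) :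
    (second.countP (fun j => decide (i = j)) : Int) = (second.count i : Int) := by
  rw [List.count_eq_countP]
  congr 1
  apply List.countP_congr
  intro j _
  simp only [decide_eq_true_eq, beq_iff_eq]
  exact eq_comm

-- ===== VERDICT (by name: the statement is the Claim_ definition above) =====
theorem is_similar_spec : Claim_equal_is_similar := by
  intro first second _ hpre
  unfold Spec_is_similar is_similar is_similar_alt
  rw [outer_fold_eq]
  simp only [PySem.List.foldl_add, PySem.Dict.getD_foldl_insert_add_one, PySem.Dict.getD_empty,
    zero_add]
  have hsame : (first.map (fun i => (second.countP (fun j => decide (PySem.Str.pyGet? i (-1) = PySem.Str.pyGet? j (-1))) : Int))).sum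
      = (first.map (fun i => (((second.map (fun j => lastSlice j)).count (lastSlice i) : Nat) : Int))).sum := by
    congr 1
    exact List.map_congr_left (fun i hi => same_count_eq first second hpre i hi)
  have hsim : (first.map (fun i => (second.countP (fun j => decide (i = j)) : Int))).sum
      = (first.map (fun i => ((second.count i : Nat) : Int))).sum := by
    congr 1
    exact List.map_congr_left (fun i _ => similar_count_eq second i)
  rw [hsame, hsim]
  by_cases h1 : (first.map (fun i => (((second.map (fun j => lastSlice j)).count (lastSlice i) : Nat) : Int))).sum = 2 <;>
    by_cases h2 : (first.map (fun i => ((second.count i : Nat) : Int))).sum = 1 <;>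
    simp [h1, h2]
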